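-- pv_equiv track=rewrite | github.com/friguzzi/pasta | pasta/pasta_solver.py | remove_dominated_explanations
-- ===== SOURCE A (Python) =====
-- def remove_dominated_explanations(abd_exp : 'list[list[str]]') -> 'list[set[str]]':
--     '''
--     Removes the dominated explanations, used in abduction.
--     '''
--     ls : 'list[set[str]]' = []
--     for exp in abd_exp:
--         e : 'set[str]' = set()
--         for el in exp:
--             if not el.startswith('not') and el != 'q':
--                 if el.startswith('abd_'):
--                     e.add(el[4:])
--                 else:
--                     e.add(el)
--         ls.append(e)
--
--     for i, el in enumerate(ls):
--         for j in range(i + 1, len(ls)):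
--             if len(el) > 0:
--                 if el.issubset(ls[j]):
--                     ls[j] = set()  # type: ignore
--
--     return ls
-- ===== SOURCE B (Python) =====
-- def remove_dominated_explanations(abd_exp : 'list[list[str]]') -> 'list[set[str]]':
--     '''
--     Removes the dominated explanations, used in abduction.
--     '''
--     survivors : 'list[set[str]]' = []
--     result : 'list[set[str]]' = []
--     for exp in abd_exp:
--         s = {el[4:] if el.startswith('abd_') else el
--              for el in exp
--              if not el.startswith('not') and el != 'q'}
--         if any(t <= s for t in survivors):
--             result.append(set())
--         else:
--             result.append(s)
--             if s:
--                 survivors.append(s)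
--     return result
-- ===== Notes on version B (the rewrite author's own statement) =====
-- stated objective: alternative
-- what changed: Replaces the quadratic in-place pairwise emptying pass (every earlier set tested against every later one, mutating the list) with a single forward pass that maintains a list of minimal nonempty 'survivor' sets and decides each explanation against the survivors only, building the result as it goes; set construction becomes a comprehension.
import Mathlib
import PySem

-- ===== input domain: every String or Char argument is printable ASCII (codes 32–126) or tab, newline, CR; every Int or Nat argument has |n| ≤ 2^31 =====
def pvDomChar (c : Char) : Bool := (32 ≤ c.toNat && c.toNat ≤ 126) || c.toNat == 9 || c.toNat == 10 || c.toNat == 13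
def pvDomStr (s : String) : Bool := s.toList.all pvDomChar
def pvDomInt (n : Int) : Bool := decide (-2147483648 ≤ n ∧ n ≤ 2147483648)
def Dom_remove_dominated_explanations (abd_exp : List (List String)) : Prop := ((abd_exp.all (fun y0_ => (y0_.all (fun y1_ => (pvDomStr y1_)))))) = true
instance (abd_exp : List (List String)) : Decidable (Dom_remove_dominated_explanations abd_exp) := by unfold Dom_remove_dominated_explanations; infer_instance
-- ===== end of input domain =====

-- B replaces A's quadratic in-place pairwise emptying with a single forward pass over a
-- list of surviving minimal nonempty sets (alternative decomposition; same asymptotic cost).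


-- ===== PORT A =====
-- body of A's inner phase-1 loop ('for el in exp: …')
def rde_addStep (e : PySem.Set String) (el : String) : PySem.Set String :=
  if !(PySem.Str.startswith el "not") && el != "q" then
    (if PySem.Str.startswith el "abd_" then
      PySem.Set.add e (PySem.Str.slice el (some 4) none)
    else
      PySem.Set.add e el)
  else e

-- phase 2 of A: 'for i, el in enumerate(ls): for j in range(i+1, len(ls)): …' — the outer
-- loop becomes structural recursion on the list, the inner index loop over j > i becomes the
-- elementwise update of the remaining suffix (each j-step reads only el and ls[j]).
def rde_pass2 : List (PySem.Set String) → List (PySem.Set String)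
  | [] => []
  | el :: rest =>
      el :: rde_pass2 (rest.map (fun s =>
        if PySem.Set.len el > 0 then
          (if PySem.Set.issubset el s then PySem.Set.empty else s)
        else s))
  termination_by ls => ls.length
  decreasing_by simp

def remove_dominated_explanations (abd_exp : List (List String)) : List (List String) :=
  rde_pass2 (abd_exp.map (fun exp => exp.foldl rde_addStep PySem.Set.empty))

-- ===== PORT B =====
-- the element transform and filter of Source B's set comprehension
def rde_f (el : String) : String :=
  if PySem.Str.startswith el "abd_" then PySem.Str.slice el (some 4) none else el

def rde_p (el : String) : Bool := !(PySem.Str.startswith el "not") && el != "q"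

def rde_mk (exp : List String) : PySem.Set String :=
  PySem.Set.ofList ((exp.filter rde_p).map rde_f)

-- body of Source B's main loop: state = (survivors, result)
def rde_step (st : List (PySem.Set String) × List (PySem.Set String)) (exp : List String) :
    List (PySem.Set String) × List (PySem.Set String) :=
  let s := rde_mk exp
  if st.1.any (fun t => PySem.Set.issubset t s) then
    (st.1, st.2 ++ [PySem.Set.empty])
  else
    ((if s = [] then st.1 else st.1 ++ [s]), st.2 ++ [s])

def remove_dominated_explanations_alt (abd_exp : List (List String)) : List (List String) :=
  (abd_exp.foldl rde_step ([], [])).2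

-- ===== PRECONDITION & SPEC =====
def Spec_remove_dominated_explanations (abd_exp : List (List String)) (out : List (List String)) : Prop := out = remove_dominated_explanations_alt abd_exp
instance (abd_exp : List (List String)) (out : List (List String)) : Decidable (Spec_remove_dominated_explanations abd_exp out) := by unfold Spec_remove_dominated_explanations; infer_instance

-- ===== CLAIM (what is proved, stated in full; the proofs are below) =====
def Claim_equal_remove_dominated_explanations : Prop := ∀ (abd_exp : List (List String)), Dom_remove_dominated_explanations abd_exp → Spec_remove_dominated_explanations abd_exp (remove_dominated_explanations abd_exp)

-- ===== LEMMAS AND PROOFS =====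

-- B's single pass, written as recursion carrying the survivors list (proof-side view of the foldl)
def rde_brec (survivors : List (PySem.Set String)) : List (List String) → List (PySem.Set String)
  | [] => []
  | exp :: rest =>
      let s := rde_mk exp
      if survivors.any (fun t => PySem.Set.issubset t s) then
        PySem.Set.empty :: rde_brec survivors rest
      else
        s :: rde_brec (if s = [] then survivors else survivors ++ [s]) rest

-- the combined effect of the earlier surviving sets on a later set
def rde_dom (survivors : List (PySem.Set String)) (s : PySem.Set String) : PySem.Set String :=
  if survivors.any (fun t => PySem.Set.issubset t s) then PySem.Set.empty else s

lemma rde_foldl_eq_brec (l : List (List String))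
    (survivors acc : List (PySem.Set String)) :
    (l.foldl rde_step (survivors, acc)).2 = acc ++ rde_brec survivors l := by
  induction l generalizing survivors acc with
  | nil => simp [rde_brec]
  | cons exp rest ih =>
      rw [List.foldl_cons]
      by_cases h : survivors.any (fun t => PySem.Set.issubset t (rde_mk exp)) = true
      · rw [show rde_step (survivors, acc) exp = (survivors, acc ++ [PySem.Set.empty]) from by
          simp [rde_step, h]]
        rw [ih, rde_brec]
        simp [h]
      · simp only [Bool.not_eq_true] at h
        rw [show rde_step (survivors, acc) exp
            = ((if rde_mk exp = [] then survivors else survivors ++ [rde_mk exp]),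
               acc ++ [rde_mk exp]) from by simp [rde_step, h]]
        rw [ih, rde_brec]
        simp [h]

lemma rde_addStep_pos (e : PySem.Set String) (el : String) (hp : rde_p el = true) :
    rde_addStep e el = PySem.Set.add e (rde_f el) := by
  unfold rde_addStep rde_f rde_p at *
  rw [if_pos hp]
  by_cases ha : PySem.Str.startswith el "abd_" = true
  · rw [if_pos ha, if_pos ha]
  · rw [if_neg ha, if_neg ha]

lemma rde_addStep_neg (e : PySem.Set String) (el : String) (hp : rde_p el = false) :
    rde_addStep e el = e := by
  unfold rde_addStep rde_p at *
  exact if_neg (by simp only [hp]; exact Bool.false_ne_true)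

lemma rde_mk_eq_foldl (exp : List String) :
    exp.foldl rde_addStep PySem.Set.empty = rde_mk exp := by
  unfold rde_mk
  rw [← PySem.Set.update_empty, PySem.Set.update_map_eq_foldl_add]
  suffices h : ∀ (e : PySem.Set String),
      exp.foldl rde_addStep e
      = (exp.filter rde_p).foldl (fun s el => PySem.Set.add s (rde_f el)) e from h _
  induction exp with
  | nil => intro e; rfl
  | cons el rest ih =>
      intro e
      rw [List.foldl_cons, List.filter_cons]
      by_cases hp : rde_p el = true
      · rw [if_pos hp, List.foldl_cons, rde_addStep_pos e el hp, ih]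
      · simp only [Bool.not_eq_true] at hp
        rw [if_neg (by simp [hp]), rde_addStep_neg e el hp, ih]

-- the pointwise key fact: applying one more surviving set after the old survivors
-- is the same as extending the survivors list
lemma rde_dom_step (survivors : List (PySem.Set String)) (s t : PySem.Set String)
    (hs : survivors.any (fun u => PySem.Set.issubset u s) = false) :
    (if PySem.Set.len s > 0 then
      (if PySem.Set.issubset s (rde_dom survivors t) then PySem.Set.empty
       else rde_dom survivors t)
     else rde_dom survivors t)
    = rde_dom (if s = [] then survivors else survivors ++ [s]) t := by
  unfold rde_dom
  by_cases hse : s = []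
  · subst hse
    simp [PySem.Set.len]
  · rw [if_neg hse]
    by_cases hA : survivors.any (fun u => PySem.Set.issubset u t) = true
    · simp [hA, List.any_append]
    · simp only [Bool.not_eq_true] at hA
      simp [hA, List.any_append]
      intro h
      exact absurd h hse

lemma rde_brec_eq_pass2 (l : List (List String)) (survivors : List (PySem.Set String)) :
    rde_brec survivors l = rde_pass2 ((l.map rde_mk).map (rde_dom survivors)) := by
  induction l generalizing survivors with
  | nil => simp [rde_brec, rde_pass2]
  | cons exp rest ih =>
      simp only [List.map_cons, rde_brec, rde_pass2]
      by_cases h : survivors.any (fun t => PySem.Set.issubset t (rde_mk exp)) = true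
      · have hd : rde_dom survivors (rde_mk exp) = PySem.Set.empty := by
          simp [rde_dom, h]
        simp only [h, if_pos, hd]
        congr 1
        rw [ih survivors, List.map_map, List.map_map]
        apply congrArg rde_pass2
        symm
        apply List.map_congr_left
        intro t _
        simp [Function.comp, PySem.Set.len, PySem.Set.empty]
      · simp only [Bool.not_eq_true] at h
        have hd : rde_dom survivors (rde_mk exp) = rde_mk exp := by
          simp [rde_dom, h]
        simp only [h, Bool.false_eq_true, if_false, hd]
        congr 1
        rw [ih (if rde_mk exp = [] then survivors else survivors ++ [rde_mk exp]),
            List.map_map, List.map_map, List.map_map]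
        apply congrArg rde_pass2
        apply List.map_congr_left
        intro t _
        exact (rde_dom_step survivors (rde_mk exp) (rde_mk t) h).symm

-- ===== VERDICT (by name: the statement is the Claim_ definition above) =====
theorem remove_dominated_explanations_spec : Claim_equal_remove_dominated_explanations := by
  intro abd_exp _
  unfold Spec_remove_dominated_explanations remove_dominated_explanations
    remove_dominated_explanations_alt
  rw [rde_foldl_eq_brec abd_exp [] [], List.nil_append, rde_brec_eq_pass2 abd_exp []]
  rw [List.map_congr_left (fun t (_ : t ∈ List.map rde_mk abd_exp) =>
        (by simp [rde_dom] : rde_dom [] t = id t)), List.map_id]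
  congr 1
  exact List.map_congr_left (fun exp _ => rde_mk_eq_foldl exp)
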